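-- pv_equiv track=rewrite | github.com/procesaur/PaLMA | preprocessing/preprocessing.py | insert_exc
-- ===== SOURCE A (Python) =====
-- def insert_exc(lines, exclusion):
--     finalines = []
--     c = 0
--     for i in range(0, len(lines) + len(exclusion)):
--         if i in exclusion.keys():
--             finalines.append(exclusion[i])
--         else:
--             try:
--                 finalines.append(lines[c])
--                 c += 1
--             except:
--                 pass
--     return finalines
-- ===== SOURCE B (Python) =====
-- def insert_exc(lines, exclusion):
--     result = list(lines)
--     total = len(lines) + len(exclusion)
--     for k in sorted(exclusion):
--         if 0 <= k < total:
--             result.insert(k, exclusion[k])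
--     return result
-- ===== Notes on version B (the rewrite author's own statement) =====
-- stated objective: simpler
-- what changed: Instead of scanning every position of the combined range with a per-position key-membership test and a separate line counter, B copies the lines and splices each exclusion value in ascending key order with list.insert, whose index clamping reproduces A's drop/append corner behaviour.
import Mathlib
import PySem

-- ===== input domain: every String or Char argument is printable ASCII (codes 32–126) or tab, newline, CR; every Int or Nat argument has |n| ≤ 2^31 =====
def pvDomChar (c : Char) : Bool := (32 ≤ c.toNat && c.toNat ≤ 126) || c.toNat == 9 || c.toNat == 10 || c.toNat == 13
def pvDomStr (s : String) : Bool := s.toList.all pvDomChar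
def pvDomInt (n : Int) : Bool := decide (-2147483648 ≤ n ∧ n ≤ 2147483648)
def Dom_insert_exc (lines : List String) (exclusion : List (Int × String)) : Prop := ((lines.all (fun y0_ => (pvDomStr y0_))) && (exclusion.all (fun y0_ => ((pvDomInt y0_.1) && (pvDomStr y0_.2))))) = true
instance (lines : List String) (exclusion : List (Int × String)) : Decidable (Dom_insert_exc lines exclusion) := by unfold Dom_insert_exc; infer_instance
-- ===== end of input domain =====

-- B replaces A's scan of every combined-range position (with a per-position key-membership test)
-- by copying the lines and splicing the exclusion values in ascending key order: simpler and shorter.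

-- ===== PORT A =====
-- literal transliteration of A: for i in range(0, len(lines)+len(exclusion)) with state (finalines, c);
-- 'i in exclusion.keys()' = key membership, 'exclusion[i]' = first-match lookup, lines[c] IndexError = pyGet? none → pass
def insert_exc (lines : List String) (exclusion : List (Int × String)) : List String :=
  ((PySem.List.pyRange 0 ((lines.length : Int) + (exclusion.length : Int)) 1).foldl
    (fun (st : List String × Int) i =>
      if (exclusion.map Prod.fst).contains i then
        (st.1 ++ [((exclusion.lookup i).getD "")], st.2)
      else
        match PySem.List.pyGet? lines st.2 with
        | some v => (st.1 ++ [v], st.2 + 1)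
        | none => st)
    ([], 0)).1

-- ===== PORT B =====
-- literal transliteration of B: result = list(lines); for k in sorted(exclusion): if 0 <= k < total: result.insert(k, exclusion[k])
def insert_exc_alt (lines : List String) (exclusion : List (Int × String)) : List String :=
  (PySem.List.sorted (exclusion.map Prod.fst) (fun k => k) false).foldl
    (fun res k =>
      if 0 ≤ k ∧ k < (lines.length : Int) + (exclusion.length : Int) then
        PySem.List.insert res k ((exclusion.lookup k).getD "")
      else res)
    lines

-- ===== PRECONDITION & SPEC =====
-- Pre_ excludes association lists with duplicate keys: a Python dict cannot contain duplicate
-- keys, so such lists correspond to no Python input; no input A accepts is excluded.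
def Pre_insert_exc (lines : List String) (exclusion : List (Int × String)) : Prop :=
  (exclusion.map Prod.fst).Nodup

instance (lines : List String) (exclusion : List (Int × String)) : Decidable (Pre_insert_exc lines exclusion) := by unfold Pre_insert_exc; infer_instance

def pvWitness_insert_exc : List String × (List (Int × String)) := (["a", "b"], [(0, "x"), (3, "y")])

def Spec_insert_exc (lines : List String) (exclusion : List (Int × String)) (out : List String) : Prop := out = insert_exc_alt lines exclusion
instance (lines : List String) (exclusion : List (Int × String)) (out : List String) : Decidable (Spec_insert_exc lines exclusion out) := by unfold Spec_insert_exc; infer_instance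

-- ===== CLAIM (what is proved, stated in full; the proofs are below) =====
def Claim_equal_insert_exc : Prop := ∀ (lines : List String) (exclusion : List (Int × String)), Dom_insert_exc lines exclusion → Pre_insert_exc lines exclusion → Spec_insert_exc lines exclusion (insert_exc lines exclusion)

-- ===== LEMMAS AND PROOFS =====

-- insertion with take/drop clamping (what Python list.insert does at a nonnegative index)
def pvIns (res : List String) (p : Nat) (v : String) : List String := res.take p ++ v :: res.drop p

-- A's loop, restated forward-building over Nat indices: fuel = remaining iterations, i = current
-- index, ls = the not-yet-consumed suffix of lines (the counter c became "drop")
def pvMA (kvs : List (Nat × String)) : Nat → Nat → List String → List String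
  | 0, _, _ => []
  | fuel+1, i, ls =>
    match kvs.lookup i with
    | some v => v :: pvMA kvs fuel (i+1) ls
    | none =>
      match ls with
      | [] => pvMA kvs fuel (i+1) []
      | l :: ls' => l :: pvMA kvs fuel (i+1) ls'

-- B's loop, restated over Nat keys: splice each value at (key - base) when key < T
def pvMB (T : Nat) (b : Nat) (kvs : List (Nat × String)) (ls : List String) : List String :=
  kvs.foldl (fun res kv => if kv.1 < T then pvIns res (kv.1 - b) kv.2 else res) ls

def pvKs (exclusion : List (Int × String)) : List Int :=
  PySem.List.sorted (exclusion.map Prod.fst) (fun k => k) false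

def pvKvs (exclusion : List (Int × String)) : List (Nat × String) :=
  ((pvKs exclusion).filter (fun k => decide (0 ≤ k))).map
    (fun k => (k.toNat, ((exclusion.lookup k).getD "")))

theorem pvLookup_eq_none {β : Type} (l : List (Nat × β)) (a : Nat)
    (h : ∀ p ∈ l, p.1 ≠ a) : l.lookup a = none := by
  induction l with
  | nil => rfl
  | cons p rest ih =>
    have h1 : (a == p.1) = false := by
      have := h p (List.mem_cons_self ..)
      simp only [beq_eq_false_iff_ne, ne_eq]
      omega
    simp only [List.lookup, h1]
    exact ih (fun q hq => h q (List.mem_cons_of_mem _ hq))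

theorem pvLookup_of_mem {β : Type} (l : List (Nat × β)) (a : Nat) (b : β)
    (hnd : (l.map Prod.fst).Nodup) (hmem : (a, b) ∈ l) : l.lookup a = some b := by
  induction l with
  | nil => simp at hmem
  | cons p rest ih =>
    rw [List.map_cons, List.nodup_cons] at hnd
    rcases List.mem_cons.mp hmem with h | h
    · rw [← h]; simp [List.lookup]
    · have hne : (a == p.1) = false := by
        simp only [beq_eq_false_iff_ne, ne_eq]
        intro he
        apply hnd.1
        rw [← he]
        exact List.mem_map.mpr ⟨(a, b), h, rfl⟩
      simp only [List.lookup, hne]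
      exact ih hnd.2 h

-- pvMA only queries the lookup at indices ≥ i
theorem pvMA_congr (kvs₁ kvs₂ : List (Nat × String)) (fuel i : Nat) (ls : List String)
    (h : ∀ j, i ≤ j → kvs₁.lookup j = kvs₂.lookup j) :
    pvMA kvs₁ fuel i ls = pvMA kvs₂ fuel i ls := by
  induction fuel generalizing i ls with
  | zero => rfl
  | succ n ih =>
    simp only [pvMA, h i le_rfl]
    cases kvs₂.lookup i with
    | some v => simp only []; rw [ih (i+1) ls (fun j hj => h j (by omega))]
    | none =>
      cases ls with
      | nil => exact ih (i+1) [] (fun j hj => h j (by omega))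
      | cons l ls' => simp only []; rw [ih (i+1) ls' (fun j hj => h j (by omega))]

-- all keys out of reach: A just copies fuel lines
theorem pvMA_of_ge (kvs : List (Nat × String)) (fuel i : Nat) (ls : List String)
    (h : ∀ p ∈ kvs, i + fuel ≤ p.1) : pvMA kvs fuel i ls = ls.take fuel := by
  induction fuel generalizing i ls with
  | zero => simp [pvMA]
  | succ n ih =>
    have hnone : kvs.lookup i = none :=
      pvLookup_eq_none kvs i (fun p hp => by have := h p hp; omega)
    simp only [pvMA, hnone]
    cases ls with
    | nil => simp [ih (i+1) [] (fun p hp => by have := h p hp; omega)]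
    | cons l ls' =>
      show l :: pvMA kvs n (i+1) ls' = List.take (n+1) (l :: ls')
      rw [List.take_succ_cons, ih (i+1) ls' (fun p hp => by have := h p hp; omega)]

-- decomposition of A at its smallest key
theorem pvMA_cons (k : Nat) (v : String) (rest : List (Nat × String)) (fuel i : Nat)
    (ls : List String) (hi : i ≤ k) (hlt : k < i + fuel)
    (hrest : ∀ p ∈ rest, k < p.1) :
    pvMA ((k, v) :: rest) fuel i ls =
      ls.take (k - i) ++ v :: pvMA rest (fuel - (k - i) - 1) (k + 1) (ls.drop (k - i)) := by
  induction fuel generalizing i ls with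
  | zero => omega
  | succ n ih =>
    by_cases hik : i = k
    · subst hik
      have hsome : List.lookup i ((i, v) :: rest) = some v := by simp [List.lookup]
      simp only [pvMA, hsome, Nat.sub_self, List.take_zero, List.drop_zero, List.nil_append]
      congr 1
      exact pvMA_congr _ _ n (i+1) ls (fun j hj => by
        have h1 : (j == i) = false := by simp only [beq_eq_false_iff_ne, ne_eq]; omega
        simp [List.lookup, h1])
    · have hik' : i < k := by omega
      have hnone : List.lookup i ((k, v) :: rest) = none :=
        pvLookup_eq_none _ _ (by
          intro p hp
          rcases List.mem_cons.mp hp with h | h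
          · rw [h]; simp; omega
          · have := hrest p h; omega)
      have harith : n - (k - (i+1)) - 1 = n + 1 - (k - i) - 1 := by omega
      have hk1 : k - i = (k - (i+1)) + 1 := by omega
      simp only [pvMA, hnone]
      cases ls with
      | nil =>
        show pvMA ((k, v) :: rest) n (i+1) [] = _
        rw [ih (i+1) [] (by omega) (by omega)]
        simp [harith]
      | cons l ls' =>
        show l :: pvMA ((k, v) :: rest) n (i+1) ls' = _
        rw [ih (i+1) ls' (by omega) (by omega)]
        rw [hk1]
        simp [harith]

-- guards all false: B leaves the accumulator alone
theorem pvMB_of_ge (T b : Nat) (kvs : List (Nat × String)) (ls : List String)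
    (h : ∀ p ∈ kvs, T ≤ p.1) : pvMB T b kvs ls = ls := by
  induction kvs generalizing ls with
  | nil => rfl
  | cons p rest ih =>
    have hp := h p (List.mem_cons_self ..)
    simp only [pvMB, List.foldl_cons, if_neg (by omega : ¬ p.1 < T)]
    exact ih ls (fun q hq => h q (List.mem_cons_of_mem _ hq))

-- splicing beyond an existing prefix leaves the prefix untouched
theorem pvMB_prefix (T b : Nat) (kvs : List (Nat × String)) (P S : List String) (v : String)
    (h : ∀ p ∈ kvs, b + P.length + 1 ≤ p.1) :
    pvMB T b kvs (P ++ v :: S) = P ++ v :: pvMB T (b + P.length + 1) kvs S := by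
  induction kvs generalizing S with
  | nil => rfl
  | cons q rest ih =>
    have hq := h q (List.mem_cons_self ..)
    have hrest := fun p hp => h p (List.mem_cons_of_mem _ hp)
    by_cases hT : q.1 < T
    · have key : pvIns (P ++ v :: S) (q.1 - b) q.2 =
          P ++ v :: pvIns S (q.1 - (b + P.length + 1)) q.2 := by
        unfold pvIns
        rw [List.take_append, List.drop_append,
          List.take_of_length_le (by omega), List.drop_eq_nil_of_le (by omega)]
        have hm : q.1 - b - P.length = (q.1 - (b + P.length + 1)) + 1 := by omega
        rw [hm, List.take_succ_cons, List.drop_succ_cons]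
        simp
      simp only [pvMB, List.foldl_cons, if_pos hT] at ih ⊢
      rw [key]
      exact ih (pvIns S (q.1 - (b + P.length + 1)) q.2) hrest
    · simp only [pvMB, List.foldl_cons, if_neg hT] at ih ⊢
      exact ih S hrest

-- from an accumulator that every key is past, the guarded values are appended in order
theorem pvMB_append (T b : Nat) (kvs : List (Nat × String)) (acc : List String)
    (hasc : (kvs.map Prod.fst).Pairwise (· < ·))
    (h : ∀ p ∈ kvs, b + acc.length ≤ p.1) :
    pvMB T b kvs acc = acc ++ (kvs.filter (fun kv => decide (kv.1 < T))).map Prod.snd := by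
  induction kvs generalizing acc with
  | nil => simp [pvMB]
  | cons q rest ih =>
    rw [List.map_cons, List.pairwise_cons] at hasc
    have hq := h q (List.mem_cons_self ..)
    have hrest : ∀ p ∈ rest, q.1 < p.1 := by
      intro p hp
      exact hasc.1 p.1 (List.mem_map.mpr ⟨p, hp, rfl⟩)
    by_cases hT : q.1 < T
    · have key : pvIns acc (q.1 - b) q.2 = acc ++ [q.2] := by
        unfold pvIns
        rw [List.take_of_length_le (by omega), List.drop_eq_nil_of_le (by omega)]
      simp only [pvMB, List.foldl_cons, if_pos hT] at ih ⊢
      rw [key, ih (acc ++ [q.2]) hasc.2 (by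
        intro p hp
        have := hrest p hp
        simp only [List.length_append, List.length_cons, List.length_nil]
        omega)]
      simp [hT]
    · simp only [pvMB, List.foldl_cons, if_neg hT] at ih ⊢
      rw [ih acc hasc.2 (fun p hp => by have := hrest p hp; omega)]
      simp [hT]

-- a strictly increasing Nat list with all elements in [a, b) has at most b - a elements
theorem pvChain_len (l : List Nat) (a b : Nat) (hasc : l.Pairwise (· < ·))
    (hmem : ∀ x ∈ l, a ≤ x ∧ x < b) : l.length ≤ b - a := by
  induction l generalizing a with
  | nil => simp
  | cons x t ih =>
    rw [List.pairwise_cons] at hasc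
    have hx := hmem x (List.mem_cons_self ..)
    have ht := ih (x+1) hasc.2 (fun y hy =>
      ⟨hasc.1 y hy, (hmem y (List.mem_cons_of_mem _ hy)).2⟩)
    simp only [List.length_cons]
    omega

-- the core equivalence of the two loops
theorem pvMain (kvs : List (Nat × String)) (fuel i : Nat) (ls : List String)
    (hasc : (kvs.map Prod.fst).Pairwise (· < ·))
    (hge : ∀ p ∈ kvs, i ≤ p.1)
    (hfuel : ls.length + ((kvs.map Prod.fst).filter (fun k => decide (k < i + fuel))).length ≤ fuel) :
    pvMA kvs fuel i ls = pvMB (i + fuel) i kvs ls := by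
  induction kvs generalizing fuel i ls with
  | nil =>
    rw [pvMA_of_ge _ _ _ _ (by simp), pvMB_of_ge _ _ _ _ (by simp)]
    exact List.take_of_length_le (by simpa using hfuel)
  | cons q rest ih =>
    obtain ⟨k, v⟩ := q
    rw [List.map_cons, List.pairwise_cons] at hasc
    have hrest : ∀ p ∈ rest, k < p.1 := fun p hp =>
      hasc.1 p.1 (List.mem_map.mpr ⟨p, hp, rfl⟩)
    by_cases hk : k < i + fuel
    · have hik : i ≤ k := hge (k, v) (List.mem_cons_self ..)
      have hmlt : k - i < fuel := by omega
      rw [pvMA_cons k v rest fuel i ls hik hk hrest]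
      have hstep : pvMB (i + fuel) i ((k, v) :: rest) ls =
          pvMB (i + fuel) i rest (pvIns ls (k - i) v) := by
        simp [pvMB, List.foldl_cons, if_pos hk]
      rw [hstep]
      have hcnt : ls.length +
          ((rest.map Prod.fst).filter (fun k' => decide (k' < i + fuel))).length + 1 ≤ fuel := by
        have : ((List.map Prod.fst ((k, v) :: rest)).filter
            (fun k' => decide (k' < i + fuel))).length =
            ((rest.map Prod.fst).filter (fun k' => decide (k' < i + fuel))).length + 1 := by
          simp [hk]
        omega
      have harith : k + 1 + (fuel - (k - i) - 1) = i + fuel := by omega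
      by_cases hm : k - i ≤ ls.length
      · have hP : (ls.take (k - i)).length = k - i := by
          simp [List.length_take]; omega
        have hpre : ∀ p ∈ rest, i + (ls.take (k - i)).length + 1 ≤ p.1 := by
          intro p hp
          have := hrest p hp
          rw [hP]; omega
        have hIns : pvIns ls (k - i) v = ls.take (k - i) ++ v :: ls.drop (k - i) := rfl
        rw [hIns, pvMB_prefix _ _ _ _ _ _ hpre, hP]
        congr 1
        congr 1
        have hbase : i + (k - i) + 1 = k + 1 := by omega
        rw [hbase]
        have := ih (fuel - (k - i) - 1) (k + 1) (ls.drop (k - i)) hasc.2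
          (fun p hp => by have := hrest p hp; omega)
          (by
            rw [harith]
            simp only [List.length_drop]
            omega)
        rw [this, harith]
      · -- the key is past the end of the remaining lines: everything left is appends
        have hIns : pvIns ls (k - i) v = ls ++ v :: [] := by
          unfold pvIns
          rw [List.take_of_length_le (by omega), List.drop_eq_nil_of_le (by omega)]
        have hS : ls.drop (k - i) = [] := List.drop_eq_nil_of_le (by omega)
        have hT : ls.take (k - i) = ls := List.take_of_length_le (by omega)
        rw [hIns, pvMB_prefix _ _ _ _ _ _ (by
          intro p hp
          have := hrest p hp
          omega), hS, hT]
        congr 1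
        congr 1
        have hcl : ((rest.map Prod.fst).filter
            (fun k' => decide (k' < i + fuel))).length ≤ (i + fuel) - (k + 1) := by
          apply pvChain_len _ (k+1) (i+fuel) (hasc.2.filter _)
          intro x hx
          obtain ⟨hx1, hx2⟩ := List.mem_filter.mp hx
          obtain ⟨p, hp, hpx⟩ := List.mem_map.mp hx1
          have := hrest p hp
          constructor
          · omega
          · simpa using hx2
        rw [ih (fuel - (k - i) - 1) (k + 1) [] hasc.2
          (fun p hp => by have := hrest p hp; omega)
          (by
            rw [harith]
            simp only [List.length_nil, Nat.zero_add]
            omega)]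
        rw [harith]
        rw [pvMB_append _ _ _ [] hasc.2 (by
          intro p hp
          have := hrest p hp
          simp only [List.length_nil]
          omega)]
        rw [pvMB_append _ _ _ [] hasc.2 (by
          intro p hp
          have := hrest p hp
          simp only [List.length_nil]
          omega)]
    · have hall : ∀ p ∈ (k, v) :: rest, i + fuel ≤ p.1 := by
        intro p hp
        rcases List.mem_cons.mp hp with h | h
        · rw [h]; simp; omega
        · have := hrest p h; omega
      rw [pvMA_of_ge _ _ _ _ hall, pvMB_of_ge _ _ _ _ hall]
      have : ls.length ≤ fuel := by
        have := hfuel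
        omega
      exact List.take_of_length_le this


theorem pvKvs_asc (exclusion : List (Int × String))
    (hnd : (exclusion.map Prod.fst).Nodup) :
    ((pvKvs exclusion).map Prod.fst).Pairwise (· < ·) := by
  have hle : (pvKs exclusion).Pairwise (fun a b => a ≤ b) :=
    PySem.List.sorted_pairwise _ _
  have hnd' : (pvKs exclusion).Nodup :=
    ((PySem.List.sorted_perm _ _ _).nodup_iff).mpr hnd
  have hks : (pvKs exclusion).Pairwise (· < ·) :=
    (hle.and hnd').imp (fun h => lt_of_le_of_ne h.1 h.2)
  unfold pvKvs
  rw [List.map_map, List.pairwise_map]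
  refine List.Pairwise.imp_of_mem ?_ (hks.filter _)
  intro a b ha _hb hab
  have ha0 : (0 : Int) ≤ a := by simpa using (List.mem_filter.mp ha).2
  simp only [Function.comp]
  omega

theorem pvKvs_nodup (exclusion : List (Int × String))
    (hnd : (exclusion.map Prod.fst).Nodup) :
    ((pvKvs exclusion).map Prod.fst).Nodup :=
  (pvKvs_asc exclusion hnd).imp (fun h => Nat.ne_of_lt h)

theorem pvLookup_char (exclusion : List (Int × String))
    (hnd : (exclusion.map Prod.fst).Nodup) (n : Nat) :
    (pvKvs exclusion).lookup n =
      if ((n : Int) ∈ exclusion.map Prod.fst) then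
        some ((exclusion.lookup ((n : Nat) : Int)).getD "")
      else none := by
  by_cases hc : ((n : Int) ∈ exclusion.map Prod.fst)
  · rw [if_pos hc]
    apply pvLookup_of_mem _ _ _ (pvKvs_nodup exclusion hnd)
    unfold pvKvs
    apply List.mem_map.mpr
    refine ⟨(n : Int), ?_, by simp⟩
    refine List.mem_filter.mpr ⟨?_, by simp⟩
    unfold pvKs
    exact (PySem.List.mem_sorted _ _ _ _).mpr hc
  · rw [if_neg hc]
    apply pvLookup_eq_none
    intro p hp he
    apply hc
    obtain ⟨k, hk, rfl⟩ := List.mem_map.mp hp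
    obtain ⟨hk1, hk2⟩ := List.mem_filter.mp hk
    have hk0 : (0 : Int) ≤ k := by simpa using hk2
    have : k = (n : Int) := by simp only [] at he; omega
    rw [← this]
    unfold pvKs at hk1
    exact (PySem.List.mem_sorted _ _ _ _).mp hk1

theorem pvInsert_eq (acc : List String) (k : Int) (v : String) (h : 0 ≤ k) :
    PySem.List.insert acc k v = pvIns acc k.toNat v := by
  by_cases hle : k.toNat ≤ acc.length
  · have hk : k = ((k.toNat : Nat) : Int) := by omega
    rw [hk, PySem.List.insert_natCast _ _ _ hle]; rfl
  · unfold pvIns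
    rw [List.take_of_length_le (by omega), List.drop_eq_nil_of_le (by omega)]
    simp only [PySem.List.insert, PySem.List.sliceIndices]
    have h3 : ¬ k < 0 := by omega
    have h4 : min k (acc.length : Int) = (acc.length : Int) := by omega
    simp [h3, h4, List.take_of_length_le, List.drop_eq_nil_of_le]

theorem pvMB_cons (T b n : Nat) (w : String) (kvs : List (Nat × String)) (acc : List String) :
    pvMB T b ((n, w) :: kvs) acc = pvMB T b kvs (if n < T then pvIns acc (n - b) w else acc) := rfl

theorem pvBfold (lines : List String) (exclusion : List (Int × String)) :
    ∀ (ks : List Int) (acc : List String),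
      ks.foldl (fun res k =>
        if 0 ≤ k ∧ k < (lines.length : Int) + (exclusion.length : Int) then
          PySem.List.insert res k ((exclusion.lookup k).getD "")
        else res) acc =
      pvMB (lines.length + exclusion.length) 0
        ((ks.filter (fun k => decide (0 ≤ k))).map
          (fun k => (k.toNat, ((exclusion.lookup k).getD "")))) acc := by
  intro ks
  induction ks with
  | nil => intro acc; rfl
  | cons k rest ih =>
    intro acc
    by_cases h0 : (0 : Int) ≤ k
    · rw [List.filter_cons_of_pos (by simpa using h0), List.map_cons]
      by_cases hT : k < (lines.length : Int) + (exclusion.length : Int)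
      · have hTn : k.toNat < lines.length + exclusion.length := by omega
        rw [List.foldl_cons, if_pos ⟨h0, hT⟩, pvMB_cons, if_pos hTn,
          pvInsert_eq _ _ _ h0, Nat.sub_zero]
        exact ih _
      · have hTn : ¬ (k.toNat < lines.length + exclusion.length) := by omega
        rw [List.foldl_cons, if_neg (by tauto), pvMB_cons, if_neg hTn]
        exact ih _
    · rw [List.filter_cons_of_neg (by simpa using h0), List.foldl_cons, if_neg (by tauto)]
      exact ih _

theorem pvBridgeB (lines : List String) (exclusion : List (Int × String)) :
    insert_exc_alt lines exclusion =
      pvMB (lines.length + exclusion.length) 0 (pvKvs exclusion) lines := by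
  unfold insert_exc_alt
  exact pvBfold lines exclusion (PySem.List.sorted (exclusion.map Prod.fst) (fun k => k) false) lines

theorem pvAfold (lines : List String) (exclusion : List (Int × String))
    (hnd : (exclusion.map Prod.fst).Nodup) :
    ∀ (fuel i c : Nat) (acc : List String),
      ((PySem.List.pyRange (i : Int) (((i + fuel : Nat)) : Int) 1).foldl
        (fun (st : List String × Int) j =>
          if (exclusion.map Prod.fst).contains j then
            (st.1 ++ [((exclusion.lookup j).getD "")], st.2)
          else
            match PySem.List.pyGet? lines st.2 with
            | some v => (st.1 ++ [v], st.2 + 1)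
            | none => st)
        (acc, (c : Int))).1 = acc ++ pvMA (pvKvs exclusion) fuel i (lines.drop c) := by
  intro fuel
  induction fuel with
  | zero =>
    intro i c acc
    rw [PySem.List.pyRange_one_eq_nil (by push_cast; omega)]
    simp [pvMA]
  | succ n ih =>
    intro i c acc
    rw [PySem.List.pyRange_one_cons (by push_cast; omega), List.foldl_cons]
    have ecast1 : ((i : Int) + 1) = (((i + 1 : Nat)) : Int) := by push_cast; ring
    have ecast2 : ((i + (n + 1) : Nat) : Int) = (((i + 1) + n : Nat) : Int) := by
      have : i + (n + 1) = (i + 1) + n := by omega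
      rw [this]
    by_cases hc : ((i : Int) ∈ exclusion.map Prod.fst)
    · rw [if_pos (by simpa [List.contains_iff_mem] using hc)]
      rw [ecast1, ecast2, ih (i + 1) c (acc ++ [(exclusion.lookup (i : Int)).getD ""])]
      have hlook : (pvKvs exclusion).lookup i = some ((exclusion.lookup (i : Int)).getD "") := by
        rw [pvLookup_char exclusion hnd i, if_pos hc]
      show _ = acc ++ pvMA (pvKvs exclusion) (n + 1) i (lines.drop c)
      simp only [pvMA, hlook, List.append_assoc, List.cons_append, List.nil_append]
    · rw [if_neg (by simpa [List.contains_iff_mem] using hc)]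
      have hlook : (pvKvs exclusion).lookup i = none := by
        rw [pvLookup_char exclusion hnd i, if_neg hc]
      by_cases hlt : c < lines.length
      · have hget : PySem.List.pyGet? lines ((c : Nat) : Int) = some lines[c] := by
          rw [PySem.List.pyGet?_natCast, List.getElem?_eq_getElem hlt]
        rw [hget]
        have ecast3 : ((c : Int) + 1) = (((c + 1 : Nat)) : Int) := by push_cast; ring
        rw [ecast1, ecast2, ecast3, ih (i + 1) (c + 1) (acc ++ [lines[c]])]
        have hdrop : lines.drop c = lines[c] :: lines.drop (c + 1) :=
          List.drop_eq_getElem_cons hlt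
        show _ = acc ++ pvMA (pvKvs exclusion) (n + 1) i (lines.drop c)
        rw [hdrop]
        simp only [pvMA, hlook, List.append_assoc, List.singleton_append]
      · have hget : PySem.List.pyGet? lines ((c : Nat) : Int) = none := by
          rw [PySem.List.pyGet?_natCast, List.getElem?_eq_none (by omega)]
        rw [hget]
        have hdrop : lines.drop c = [] := List.drop_eq_nil_of_le (by omega)
        rw [ecast1, ecast2, ih (i + 1) c acc]
        show _ = acc ++ pvMA (pvKvs exclusion) (n + 1) i (lines.drop c)
        rw [hdrop]
        simp only [pvMA, hlook]

theorem pvBridgeA (lines : List String) (exclusion : List (Int × String))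
    (hnd : (exclusion.map Prod.fst).Nodup) :
    insert_exc lines exclusion =
      pvMA (pvKvs exclusion) (lines.length + exclusion.length) 0 lines := by
  unfold insert_exc
  have e0 : (0 : Int) = ((0 : Nat) : Int) := rfl
  have e1 : (lines.length : Int) + (exclusion.length : Int) =
      ((0 + (lines.length + exclusion.length) : Nat) : Int) := by push_cast; ring
  rw [e0, e1, pvAfold lines exclusion hnd (lines.length + exclusion.length) 0 0 []]
  simp

-- ===== VERDICT (by name: the statement is the Claim_ definition above) =====
theorem insert_exc_spec : Claim_equal_insert_exc := by
  intro lines exclusion _hdom hpre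
  unfold Spec_insert_exc
  rw [pvBridgeA lines exclusion hpre, pvBridgeB lines exclusion]
  have h := pvMain (pvKvs exclusion) (lines.length + exclusion.length) 0 lines
    (pvKvs_asc exclusion hpre) (fun p _ => Nat.zero_le _) ?_
  · simpa using h
  · have h1 : (((pvKvs exclusion).map Prod.fst).filter
        (fun k => decide (k < 0 + (lines.length + exclusion.length)))).length ≤ exclusion.length := by
      calc _ ≤ ((pvKvs exclusion).map Prod.fst).length := List.length_filter_le _ _
        _ = (pvKvs exclusion).length := by simp [pvKvs]
        _ ≤ ((pvKs exclusion).filter (fun k => decide (0 ≤ k))).length := by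
              simp [pvKvs]
        _ ≤ (pvKs exclusion).length := List.length_filter_le _ _
        _ = exclusion.length := by simp [pvKs, PySem.List.length_sorted]
    omega
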